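-- pv_equiv track=rewrite | github.com/RaggedR/rsk-transformer | rsk.py | hillman_grassl_forward
-- ===== SOURCE A (Python) =====
-- Filling = list[list[int]]
--
-- def _transpose_filling(filling: Filling, shape: list[int]) -> list[list[int]]:
--     """Transpose a filling (rows → columns). Column j has entries from all rows containing column j."""
--     if not shape:
--         return []
--     cols = []
--     for j in range(shape[0]):
--         col = []
--         for r in range(len(filling)):
--             if j < len(filling[r]):
--                 col.append(filling[r][j])
--             else:
--                 break
--         cols.append(col)
--     return cols
--
-- def hillman_grassl_forward(shape: list[int], filling: Filling) -> Filling: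
--     """
--     Hillman-Grassl forward: filling (λ-array) → RPP.
--
--     Maps an arbitrary non-negative integer filling of shape λ to a reverse
--     plane partition (weakly increasing rows and columns) of the same shape.
--     Weight preservation: Σ RPP[r][c] = Σ filling[r][c] × hook_length(r, c).
--
--     Algorithm (Gansner/SageMath): extract hook multiplicities from the filling,
--     then for each (r, s), trace a path from (r, λ[r]-1) leftward to column s,
--     moving south when the cell below has the same old value, incrementing each
--     cell along the path.
--     """
--     lam = list(shape)
--     num_rows = len(lam)
--
--     # Transpose filling to work column-wise
--     Mt = _transpose_filling(filling, lam)
--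
--     # Extract hook multiplicities: for each column j, collect (r, j) pairs
--     # for each unit of filling at (r, j), processed bottom-to-top within column
--     hook_mults: list[tuple[int, int]] = []
--     for j, col_j in enumerate(Mt):
--         col_j_hook_mults: list[tuple[int, int]] = []
--         for r, entry in enumerate(col_j):
--             if entry != 0:
--                 col_j_hook_mults += [(r, j)] * entry
--         hook_mults += list(reversed(col_j_hook_mults))
--
--     # Initialize zero RPP
--     res = [[0] * rowlen for rowlen in lam]
--
--     # Process each hook multiplicity in reverse order
--     for r, s in reversed(hook_mults):
--         i = r
--         j = lam[r] - 1  # start at rightmost cell in row r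
--         while True:
--             old = res[i][j]
--             res[i][j] += 1
--             # Try to move south: cell below has same old value
--             if i + 1 < num_rows and j < lam[i + 1] and old == res[i + 1][j]:
--                 i += 1
--             else:
--                 if j == s:
--                     break
--                 j -= 1
--
--     return res
-- ===== SOURCE B (Python) =====
-- def hillman_grassl_forward(shape: list[int], filling: list[list[int]]) -> list[list[int]]:
--     """Hillman-Grassl forward, driven without the transpose helper or the
--     hook_mults list, and with a segment-based path tracer: for each unit the
--     path is built one row-segment at a time (scan leftward for the drop
--     column, then bulk-increment the segment) instead of walking cell by cell
--     with interleaved updates."""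
--     num_rows = len(shape)
--     res = [[0] * rowlen for rowlen in shape]
--     top = shape[0] if shape else 0
--     for j in range(top - 1, -1, -1):
--         for r in range(len(filling)):
--             row = filling[r]
--             if j >= len(row):
--                 break
--             for _ in range(row[j]):
--                 i, e = r, shape[r] - 1
--                 while True:
--                     d = -1
--                     for c in range(e, j - 1, -1):
--                         if i + 1 < num_rows and c < shape[i + 1] and res[i][c] == res[i + 1][c]:
--                             d = c
--                             break
--                     if d < 0:
--                         for c in range(j, e + 1):
--                             res[i][c] += 1
--                         break
--                     for c in range(d, e + 1):
--                         res[i][c] += 1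
--                     i, e = i + 1, d
--     return res
-- ===== Notes on version B (the rewrite author's own statement) =====
-- stated objective: alternative
-- what changed: B drops the transpose helper and the materialized doubly-reversed hook_mults list (driving the units directly from a fused column-descending/row-ascending loop) and replaces A's cell-by-cell zigzag path walk with interleaved updates by a segment-based tracer: per row it first scans leftward for the drop column, then bulk-increments the whole row segment at once.
import Mathlib
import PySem

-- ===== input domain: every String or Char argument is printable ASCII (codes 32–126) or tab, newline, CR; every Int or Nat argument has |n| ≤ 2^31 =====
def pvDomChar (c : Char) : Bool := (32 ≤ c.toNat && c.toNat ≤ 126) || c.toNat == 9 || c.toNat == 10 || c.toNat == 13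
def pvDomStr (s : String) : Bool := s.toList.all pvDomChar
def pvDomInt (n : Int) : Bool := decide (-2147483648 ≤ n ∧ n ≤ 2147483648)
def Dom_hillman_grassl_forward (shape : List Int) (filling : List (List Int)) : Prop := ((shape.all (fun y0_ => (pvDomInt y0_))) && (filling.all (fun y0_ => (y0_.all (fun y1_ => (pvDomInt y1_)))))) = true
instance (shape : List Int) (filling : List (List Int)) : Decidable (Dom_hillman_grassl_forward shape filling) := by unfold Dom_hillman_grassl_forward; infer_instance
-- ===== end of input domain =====

-- B replaces A's cell-by-cell zigzag path walk (and its transpose/hook_mults staging) by a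
-- segment-based tracer: per row it scans leftward for the drop column, then bulk-increments the
-- whole row segment (objective: alternative decomposition, same asymptotic cost).

-- Termination fuel shared by both ports' while-loops: one path visits at most
-- shape.length + shape[r] cells (and at most shape.length rows), so this bound is generous.
def pvFuel (shape : List Int) : Nat := shape.foldl (fun a x => a + x.toNat) shape.length + 1

-- ===== PORT A =====
-- the while-loop of Python A: trace a path from (i, j) toward column s, moving south when the
-- cell below equals the old value, incrementing cells one at a time.
-- pyGet? none / fuel 0 are unreachable under Pre_ (Python raises IndexError there).
def runPath (numRows : Int) (lam : List Int) (s : Int) : Nat → Int → Int → List (List Int) → List (List Int)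
  | 0, _, _, res => res
  | fuel+1, i, j, res =>
    match PySem.List.pyGet? res i with
    | none => res
    | some row =>
      match PySem.List.pyGet? row j with
      | none => res
      | some old =>
        let res' := PySem.List.pySetD res i (PySem.List.pySetD row j (old + 1))
        let south : Bool :=
          if i + 1 < numRows ∧ j < PySem.List.pyGetD lam (i+1) 0 then
            match PySem.List.pyGet? res' (i+1) with
            | none => false
            | some row2 =>
              match PySem.List.pyGet? row2 j with
              | none => false
              | some below => old == below
          else false
        if south then runPath numRows lam s fuel (i+1) j res'
        else if j == s then res'
        else runPath numRows lam s fuel i (j-1) res'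

-- inner loop of _transpose_filling (with its break on a short row)
def colBuild : List (List Int) → Int → List Int
  | [], _ => []
  | row :: rest, j =>
    if j < (row.length : Int) then PySem.List.pyGetD row j 0 :: colBuild rest j else []

def transposeFilling (filling : List (List Int)) (shape : List Int) : List (List Int) :=
  match shape with
  | [] => []
  | s0 :: _ => (PySem.List.pyRange 0 s0 1).foldl (fun cols j => cols ++ [colBuild filling j]) []

-- inner loop building col_j_hook_mults ([(r, j)] * entry for nonzero entries)
def colUnits (j : Int) (col : List Int) : List (Int × Int) :=
  (PySem.List.enumerate col 0).foldl
    (fun c re => if re.2 ≠ 0 then c ++ List.replicate re.2.toNat (re.1, j) else c) []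

def hillman_grassl_forward (shape : List Int) (filling : List (List Int)) : List (List Int) :=
  let lam := shape
  let numRows : Int := lam.length
  let Mt := transposeFilling filling lam
  let hook_mults : List (Int × Int) :=
    (PySem.List.enumerate Mt 0).foldl (fun acc jc => acc ++ (colUnits jc.1 jc.2).reverse) []
  let res := lam.map (fun rowlen => List.replicate rowlen.toNat (0 : Int))
  hook_mults.reverse.foldl
    (fun res rs => runPath numRows lam rs.2 (pvFuel shape) rs.1 (PySem.List.pyGetD lam rs.1 0 - 1) res) res

-- ===== PORT B =====
-- 'res[i][c] += 1'
def pvIncr (res : List (List Int)) (i c : Int) : List (List Int) :=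
  PySem.List.pySetD res i
    (PySem.List.pySetD (PySem.List.pyGetD res i []) c
      (PySem.List.pyGetD (PySem.List.pyGetD res i []) c 0 + 1))

-- 'for c in range(lo, hi + 1): res[i][c] += 1'
def incrRange (res : List (List Int)) (i lo hi : Int) : List (List Int) :=
  (PySem.List.pyRange lo (hi+1) 1).foldl (fun a c => pvIncr a i c) res

-- 'd = -1; for c in range(e, j - 1, -1): if …: d = c; break'
def scanLoop (numRows : Int) (lam : List Int) (res : List (List Int)) (i : Int) : List Int → Int
  | [] => -1
  | c :: rest =>
    if i + 1 < numRows ∧ c < PySem.List.pyGetD lam (i+1) 0 ∧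
        PySem.List.pyGetD (PySem.List.pyGetD res i []) c 0
          = PySem.List.pyGetD (PySem.List.pyGetD res (i+1) []) c 0
    then c else scanLoop numRows lam res i rest

-- the 'while True' of B: find the drop column of row i, bulk-increment the segment, go south
def segLoop (numRows : Int) (lam : List Int) (s : Int) : Nat → Int → Int → List (List Int) → List (List Int)
  | 0, _, _, res => res
  | f+1, i, e, res =>
    let d := scanLoop numRows lam res i (PySem.List.pyRange e (s-1) (-1))
    if d < 0 then incrRange res i s e
    else segLoop numRows lam s f (i+1) d (incrRange res i d e)

-- 'for _ in range(row[j]):'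
def applyUnits (shape : List Int) (numRows r j : Int) : Nat → List (List Int) → List (List Int)
  | 0, res => res
  | n+1, res =>
    applyUnits shape numRows r j n
      (segLoop numRows shape j (pvFuel shape) r (PySem.List.pyGetD shape r 0 - 1) res)

-- 'for r in range(len(filling)): … if j >= len(row): break …'
def rowLoop (shape : List Int) (numRows j : Int) : List (List Int) → Int → List (List Int) → List (List Int)
  | [], _, res => res
  | row :: rest, r, res =>
    if (row.length : Int) ≤ j then res
    else rowLoop shape numRows j rest (r+1)
      (applyUnits shape numRows r j (PySem.List.pyGetD row j 0).toNat res)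

def hillman_grassl_forward_alt (shape : List Int) (filling : List (List Int)) : List (List Int) :=
  let numRows : Int := shape.length
  let res := shape.map (fun rowlen => List.replicate rowlen.toNat (0 : Int))
  let top : Int := shape.headD 0
  (PySem.List.pyRange (top - 1) (-1) (-1)).foldl (fun res j => rowLoop shape numRows j filling 0 res) res

-- ===== PRECONDITION & SPEC =====
-- Pre_ excludes exactly the inputs on which Python A raises IndexError: a hook-multiplicity
-- unit at (r, j) (a positive entry, reachable: j < shape[0] and no shorter row above breaks
-- the column first) whose row index r is outside shape or whose column j is ≥ shape[r],
-- which makes the path tracer run off the table.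
def Pre_hillman_grassl_forward (shape : List Int) (filling : List (List Int)) : Prop :=
  ∀ r < filling.length, ∀ j < (filling.getD r []).length,
    ((j : Int) < shape.headD 0 ∧ (∀ r' ≤ r, j < (filling.getD r' []).length) ∧
      0 < (filling.getD r []).getD j 0) →
    (r < shape.length ∧ (j : Int) < shape.getD r 0)
instance (shape : List Int) (filling : List (List Int)) : Decidable (Pre_hillman_grassl_forward shape filling) := by
  unfold Pre_hillman_grassl_forward; infer_instance

def pvWitness_hillman_grassl_forward : List Int × List (List Int) := ([2, 1], [[1, 0], [3]])

def Spec_hillman_grassl_forward (shape : List Int) (filling : List (List Int)) (out : List (List Int)) : Prop := out = hillman_grassl_forward_alt shape filling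
instance (shape : List Int) (filling : List (List Int)) (out : List (List Int)) : Decidable (Spec_hillman_grassl_forward shape filling out) := by unfold Spec_hillman_grassl_forward; infer_instance

-- ===== CLAIM (what is proved, stated in full; the proofs are below) =====
def Claim_equal_hillman_grassl_forward : Prop := ∀ (shape : List Int) (filling : List (List Int)), Dom_hillman_grassl_forward shape filling → Pre_hillman_grassl_forward shape filling → Spec_hillman_grassl_forward shape filling (hillman_grassl_forward shape filling)

-- ===== LEMMAS AND PROOFS =====

-- the per-unit steps of the two ports
def pvStep (shape : List Int) (res : List (List Int)) (rs : Int × Int) : List (List Int) :=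
  runPath shape.length shape rs.2 (pvFuel shape) rs.1 (PySem.List.pyGetD shape rs.1 0 - 1) res

def segStep (shape : List Int) (res : List (List Int)) (rs : Int × Int) : List (List Int) :=
  segLoop shape.length shape rs.2 (pvFuel shape) rs.1 (PySem.List.pyGetD shape rs.1 0 - 1) res

-- the units contributed by column j, rows from index r downward (break on a short row)
def unitsRow (j : Int) : List (List Int) → Int → List (Int × Int)
  | [], _ => []
  | row :: rest, r =>
    if (row.length : Int) ≤ j then []
    else List.replicate (PySem.List.pyGetD row j 0).toNat (r, j) ++ unitsRow j rest (r+1)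

-- res keeps the shape of lam
def pvWF (lam : List Int) (res : List (List Int)) : Prop :=
  res.map List.length = lam.map Int.toNat

-- ---------- generic pointwise facts about pvIncr ----------

theorem pyGetD_nonneg' {α : Type} (xs : List α) (i : Int) (d : α) (h : 0 ≤ i) :
    PySem.List.pyGetD xs i d = xs.getD i.toNat d := by
  simp only [PySem.List.pyGetD, PySem.List.pyGet?_of_nonneg xs h, List.getD_eq_getElem?_getD]

-- 'row[c] += 1' at the row level
def gRow (row : List Int) (ct : Nat) : List Int := row.set ct (row.getD ct 0 + 1)

theorem length_gRow (row : List Int) (ct : Nat) : (gRow row ct).length = row.length :=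
  List.length_set

theorem gRow_comm (row : List Int) (ct jt : Nat) (hne : ct ≠ jt) :
    gRow (gRow row ct) jt = gRow (gRow row jt) ct := by
  simp only [gRow, List.getD_eq_getElem?_getD, List.getElem?_set_ne hne,
    List.getElem?_set_ne (Ne.symm hne)]
  exact List.set_comm _ _ hne

theorem pvIncr_eq_set (res : List (List Int)) (i c : Int) (hi : 0 ≤ i) (hc : 0 ≤ c) :
    pvIncr res i c = res.set i.toNat (gRow (res.getD i.toNat []) c.toNat) := by
  unfold pvIncr gRow
  rw [pyGetD_nonneg' res i [] hi]
  rw [pyGetD_nonneg' _ c 0 hc]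
  rw [PySem.List.pySetD_of_nonneg _ _ hc, PySem.List.pySetD_of_nonneg _ _ hi]

theorem map_length_pvIncr (res : List (List Int)) (i c : Int) (hi : 0 ≤ i) (hc : 0 ≤ c) :
    (pvIncr res i c).map List.length = res.map List.length := by
  rw [pvIncr_eq_set res i c hi hc]
  by_cases h : i.toNat < res.length
  · rw [List.map_set, List.getD_eq_getElem _ _ h, length_gRow]
    have hm : (List.map List.length res)[i.toNat]'(by simpa using h) = res[i.toNat].length := by
      simp
    rw [← hm, List.set_getElem_self]
  · rw [List.set_eq_of_length_le (by omega)]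

theorem pvIncr_comm (res : List (List Int)) (i c j : Int) (hi : 0 ≤ i) (hc : 0 ≤ c) (hj : 0 ≤ j)
    (hne : c ≠ j) :
    pvIncr (pvIncr res i c) i j = pvIncr (pvIncr res i j) i c := by
  rw [pvIncr_eq_set res i c hi hc, pvIncr_eq_set res i j hi hj,
    pvIncr_eq_set _ i j hi hj, pvIncr_eq_set _ i c hi hc]
  by_cases h : i.toNat < res.length
  · have h1 : (res.set i.toNat (gRow (res.getD i.toNat []) c.toNat)).getD i.toNat []
        = gRow (res.getD i.toNat []) c.toNat := by
      rw [List.getD_eq_getElem?_getD, List.getElem?_set_self (by simpa using h)]; rfl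
    have h2 : (res.set i.toNat (gRow (res.getD i.toNat []) j.toNat)).getD i.toNat []
        = gRow (res.getD i.toNat []) j.toNat := by
      rw [List.getD_eq_getElem?_getD, List.getElem?_set_self (by simpa using h)]; rfl
    rw [h1, h2, List.set_set, List.set_set,
      gRow_comm _ _ _ (by omega : c.toNat ≠ j.toNat)]
  · have hle : res.length ≤ i.toNat := by omega
    simp [List.set_eq_of_length_le hle]

theorem foldl_pvIncr_swap (i j : Int) (hi : 0 ≤ i) (hj : 0 ≤ j) :
    ∀ (cs : List Int) (res : List (List Int)), (∀ c ∈ cs, 0 ≤ c ∧ c ≠ j) →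
      cs.foldl (fun a c => pvIncr a i c) (pvIncr res i j)
        = pvIncr (cs.foldl (fun a c => pvIncr a i c) res) i j := by
  intro cs
  induction cs with
  | nil => intro res _; rfl
  | cons c cs ih =>
    intro res h
    simp only [List.foldl_cons]
    rw [← pvIncr_comm res i c j hi (h c (by simp)).1 hj (h c (by simp)).2]
    exact ih (pvIncr res i c) (fun x hx => h x (by simp [hx]))

theorem incrRange_west (res : List (List Int)) (i lo j : Int) (hi : 0 ≤ i) (hlo : 0 ≤ lo)
    (h : lo ≤ j) :
    incrRange res i lo j = incrRange (pvIncr res i j) i lo (j-1) := by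
  unfold incrRange
  have h1 : j - 1 + 1 = j := by omega
  rw [h1, PySem.List.pyRange_one_succ_right h, List.foldl_append]
  simp only [List.foldl_cons, List.foldl_nil]
  exact (foldl_pvIncr_swap i j hi (by omega) (PySem.List.pyRange lo j 1) res
    (fun c hc => by rw [PySem.List.mem_pyRange_one] at hc; exact ⟨by omega, by omega⟩)).symm

theorem pvIncr_getD_other_row (res : List (List Int)) (i j m : Int) (hi : 0 ≤ i) (hj : 0 ≤ j)
    (hm : 0 ≤ m) (hne : m ≠ i) :
    PySem.List.pyGetD (pvIncr res i j) m [] = PySem.List.pyGetD res m [] := by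
  rw [pvIncr_eq_set res i j hi hj, pyGetD_nonneg' _ m [] hm, pyGetD_nonneg' res m [] hm,
    List.getD_eq_getElem?_getD, List.getD_eq_getElem?_getD,
    List.getElem?_set_ne (by omega : i.toNat ≠ m.toNat)]
  exact (List.getD_eq_getElem?_getD).symm

theorem pvIncr_getD_same_row (res : List (List Int)) (i j c : Int) (hi : 0 ≤ i) (hj : 0 ≤ j)
    (hc : 0 ≤ c) (hne : c ≠ j) :
    PySem.List.pyGetD (PySem.List.pyGetD (pvIncr res i j) i []) c 0
      = PySem.List.pyGetD (PySem.List.pyGetD res i []) c 0 := by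
  rw [pvIncr_eq_set res i j hi hj, pyGetD_nonneg' _ i [] hi, pyGetD_nonneg' res i [] hi]
  by_cases h : i.toNat < res.length
  · have h1 : (res.set i.toNat (gRow (res.getD i.toNat []) j.toNat)).getD i.toNat []
        = gRow (res.getD i.toNat []) j.toNat := by
      rw [List.getD_eq_getElem?_getD, List.getElem?_set_self (by simpa using h)]; rfl
    rw [h1, pyGetD_nonneg' _ c 0 hc, pyGetD_nonneg' _ c 0 hc]
    unfold gRow
    rw [List.getD_eq_getElem?_getD, List.getD_eq_getElem?_getD,
      List.getElem?_set_ne (by omega : j.toNat ≠ c.toNat)]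
    exact (List.getD_eq_getElem?_getD).symm
  · rw [List.set_eq_of_length_le (by omega)]

theorem scanLoop_pvIncr (L : Int) (lam : List Int) (i j : Int) (hi : 0 ≤ i) (hj : 0 ≤ j) :
    ∀ (cs : List Int) (res : List (List Int)), (∀ c ∈ cs, 0 ≤ c ∧ c ≠ j) →
      scanLoop L lam (pvIncr res i j) i cs = scanLoop L lam res i cs := by
  intro cs
  induction cs with
  | nil => intro res _; rfl
  | cons c cs ih =>
    intro res h
    obtain ⟨hc0, hcj⟩ := h c (by simp)
    simp only [scanLoop]
    rw [pvIncr_getD_same_row res i j c hi hj hc0 hcj,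
        pvIncr_getD_other_row res i j (i+1) hi hj (by omega) (by omega)]
    split
    · rfl
    · exact ih res (fun x hx => h x (by simp [hx]))

theorem scanLoop_cases (L : Int) (lam : List Int) (res : List (List Int)) (i : Int) :
    ∀ cs : List Int, scanLoop L lam res i cs = -1 ∨ scanLoop L lam res i cs ∈ cs := by
  intro cs
  induction cs with
  | nil => left; rfl
  | cons c rest ih =>
    simp only [scanLoop]
    split
    · right; exact List.mem_cons_self ..
    · rcases ih with h | h
      · left; exact h
      · right; exact List.mem_cons_of_mem _ h

-- one west move of A's tracer commutes with B's whole segment tracer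
theorem seg_west (lam : List Int) (s : Int) (f2 : Nat) (i j : Int) (res : List (List Int))
    (hi : 0 ≤ i) (hs : 0 ≤ s) (hsj : s < j)
    (hcond : ¬ (i + 1 < (lam.length : Int) ∧ j < PySem.List.pyGetD lam (i+1) 0 ∧
        PySem.List.pyGetD (PySem.List.pyGetD res i []) j 0
          = PySem.List.pyGetD (PySem.List.pyGetD res (i+1) []) j 0)) :
    segLoop lam.length lam s (f2+1) i j res = segLoop lam.length lam s (f2+1) i (j-1) (pvIncr res i j) := by
  have hj0 : 0 ≤ j := by omega
  have hmem : ∀ c ∈ PySem.List.pyRange (j-1) (s-1) (-1), 0 ≤ c ∧ c ≠ j := by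
    intro c hc
    rw [PySem.List.mem_pyRange_neg_one] at hc
    exact ⟨by omega, by omega⟩
  simp only [segLoop]
  rw [PySem.List.pyRange_neg_one_cons (by omega : s - 1 < j)]
  simp only [scanLoop]
  rw [if_neg hcond]
  rw [scanLoop_pvIncr ((lam.length : Int)) lam i j hi hj0 (PySem.List.pyRange (j-1) (s-1) (-1)) res hmem]
  by_cases hdneg : scanLoop (↑lam.length) lam res i (PySem.List.pyRange (j-1) (s-1) (-1)) < 0
  · rw [if_pos hdneg, if_pos hdneg, incrRange_west res i s j hi hs (by omega)]
  · rw [if_neg hdneg, if_neg hdneg]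
    have hdm : scanLoop (↑lam.length) lam res i (PySem.List.pyRange (j-1) (s-1) (-1))
        ∈ PySem.List.pyRange (j-1) (s-1) (-1) := by
      rcases scanLoop_cases (↑lam.length) lam res i (PySem.List.pyRange (j-1) (s-1) (-1)) with h | h
      · omega
      · exact h
    rw [PySem.List.mem_pyRange_neg_one] at hdm
    rw [incrRange_west res i _ j hi (by omega) (by omega)]

theorem map_length_foldl_pvIncr (i : Int) (hi : 0 ≤ i) :
    ∀ (cs : List Int) (res : List (List Int)), (∀ c ∈ cs, 0 ≤ c) →
      ((cs.foldl (fun a c => pvIncr a i c) res).map List.length) = res.map List.length := by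
  intro cs
  induction cs with
  | nil => intro res _; rfl
  | cons c cs ih =>
    intro res h
    simp only [List.foldl_cons]
    rw [ih (pvIncr res i c) (fun x hx => h x (by simp [hx])),
      map_length_pvIncr res i c hi (h c (by simp))]

theorem map_length_incrRange (res : List (List Int)) (i lo hi' : Int) (hi : 0 ≤ i)
    (hlo : 0 ≤ lo) :
    (incrRange res i lo hi').map List.length = res.map List.length := by
  unfold incrRange
  exact map_length_foldl_pvIncr i hi _ res
    (fun c hc => by rw [PySem.List.mem_pyRange_one] at hc; omega)

theorem map_length_segLoop (lam : List Int) (s : Int) (hs : 0 ≤ s) :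
    ∀ (f : Nat) (i e : Int) (res : List (List Int)), 0 ≤ i →
      (segLoop lam.length lam s f i e res).map List.length = res.map List.length := by
  intro f
  induction f with
  | zero => intro i e res _; rfl
  | succ f ih =>
    intro i e res hi
    simp only [segLoop]
    by_cases hd : scanLoop (↑lam.length) lam res i (PySem.List.pyRange e (s-1) (-1)) < 0
    · rw [if_pos hd]
      exact map_length_incrRange res i s e hi hs
    · rw [if_neg hd]
      rw [ih (i+1) _ _ (by omega)]
      exact map_length_incrRange res i _ e hi (by omega)

-- ---------- the pointwise equivalence of the two tracers ----------

theorem pvWF_length (lam : List Int) (res : List (List Int)) (h : pvWF lam res) :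
    res.length = lam.length := by
  have := congrArg List.length h
  simpa using this

theorem pvWF_rowlen (lam : List Int) (res : List (List Int)) (h : pvWF lam res) (it : Nat)
    (hit : it < res.length) (hit2 : it < lam.length) :
    res[it].length = (lam[it]).toNat := by
  have h2 : (res.map List.length)[it]? = (lam.map Int.toNat)[it]? := by rw [h]
  rw [List.getElem?_map, List.getElem?_map, List.getElem?_eq_getElem hit,
    List.getElem?_eq_getElem hit2] at h2
  simpa using h2

theorem pvWF_pvIncr (lam : List Int) (res : List (List Int)) (i c : Int) (h : pvWF lam res)
    (hi : 0 ≤ i) (hc : 0 ≤ c) : pvWF lam (pvIncr res i c) := by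
  unfold pvWF
  rw [map_length_pvIncr res i c hi hc]
  exact h

theorem runPath_eq_segLoop (lam : List Int) (s : Int) (hs : 0 ≤ s) :
    ∀ (fuel : Nat) (fuel2 : Nat) (i j : Int) (res : List (List Int)),
      pvWF lam res →
      0 ≤ i → i < (lam.length : Int) →
      s ≤ j → j < PySem.List.pyGetD lam i 0 →
      (j - s).toNat + (lam.length - i.toNat) ≤ fuel →
      lam.length - i.toNat ≤ fuel2 →
      runPath lam.length lam s fuel i j res = segLoop lam.length lam s fuel2 i j res := by
  intro fuel
  induction fuel with
  | zero =>
    intro fuel2 i j res hWF hi0 hiL hsj hjlt hf hf2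
    exfalso; omega
  | succ fuel ih =>
    intro fuel2 i j res hWF hi0 hiL hsj hjlt hf hf2
    have hlen := pvWF_length lam res hWF
    have hit : i.toNat < res.length := by omega
    have hitl : i.toNat < lam.length := by omega
    have hj0 : 0 ≤ j := le_trans hs hsj
    have hglam : PySem.List.pyGetD lam i 0 = lam[i.toNat] :=
      PySem.List.pyGetD_eq_getElem lam 0 hi0 hiL
    have hjl' : j < lam[i.toNat] := by rw [hglam] at hjlt; exact hjlt
    have hrl : res[i.toNat].length = lam[i.toNat].toNat := pvWF_rowlen lam res hWF i.toNat hit hitl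
    have hjt : j.toNat < res[i.toNat].length := by omega
    obtain ⟨f2, rfl⟩ : ∃ f2', fuel2 = f2' + 1 := ⟨fuel2 - 1, by omega⟩
    have e1 : PySem.List.pyGet? res i = some (res[i.toNat]'hit) := by
      rw [PySem.List.pyGet?_of_nonneg res hi0, List.getElem?_eq_getElem hit]
    have e2 : PySem.List.pyGet? (res[i.toNat]'hit) j = some (res[i.toNat][j.toNat]'hjt) := by
      rw [PySem.List.pyGet?_of_nonneg _ hj0, List.getElem?_eq_getElem hjt]
    have hres' : PySem.List.pySetD res i
        (PySem.List.pySetD (res[i.toNat]'hit) j ((res[i.toNat][j.toNat]'hjt) + 1))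
        = pvIncr res i j := by
      rw [pvIncr_eq_set res i j hi0 hj0, PySem.List.pySetD_of_nonneg _ _ hj0,
        PySem.List.pySetD_of_nonneg _ _ hi0]
      unfold gRow
      rw [List.getD_eq_getElem _ _ hit, List.getD_eq_getElem _ _ hjt]
    have hWF' : pvWF lam (pvIncr res i j) := pvWF_pvIncr lam res i j hWF hi0 hj0
    have hIR : ∀ jj : Int, incrRange res i jj jj = pvIncr res i jj := by
      intro jj
      unfold incrRange
      rw [PySem.List.pyRange_one_singleton]
      rfl
    -- the condition of B's scan at the entry cell, in getElem form
    have eL : PySem.List.pyGetD (PySem.List.pyGetD res i []) j 0 = res[i.toNat][j.toNat] := by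
      rw [pyGetD_nonneg' res i [] hi0, List.getD_eq_getElem _ _ hit,
        pyGetD_nonneg' _ j 0 hj0, List.getD_eq_getElem _ _ hjt]
    simp only [runPath, e1, e2, hres']
    by_cases hc1 : i + 1 < ((lam.length : Nat) : Int) ∧ j < PySem.List.pyGetD lam (i+1) 0
    · have hit1l : i.toNat + 1 < lam.length := by omega
      have hit1 : i.toNat + 1 < res.length := by omega
      have hi1t : (i+1).toNat = i.toNat + 1 := by omega
      have e3 : PySem.List.pyGet? (pvIncr res i j) (i+1) = some (res[i.toNat + 1]'hit1) := by
        rw [PySem.List.pyGet?_of_nonneg _ (by omega : (0:Int) ≤ i+1), hi1t,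
          pvIncr_eq_set res i j hi0 hj0,
          List.getElem?_set_ne (by omega : i.toNat ≠ i.toNat + 1),
          List.getElem?_eq_getElem hit1]
      have hg1 : PySem.List.pyGetD lam (i+1) 0 = lam[i.toNat + 1] := by
        rw [PySem.List.pyGetD_eq_getElem lam 0 (by omega) (by exact_mod_cast hc1.1)]
        simp only [hi1t]
      have hrl1 : res[i.toNat + 1].length = lam[i.toNat + 1].toNat :=
        pvWF_rowlen lam res hWF _ hit1 hit1l
      have hjt1 : j.toNat < res[i.toNat + 1].length := by
        have := hc1.2; rw [hg1] at this; omega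
      have e4 : PySem.List.pyGet? (res[i.toNat + 1]'hit1) j
          = some (res[i.toNat + 1][j.toNat]'hjt1) := by
        rw [PySem.List.pyGet?_of_nonneg _ hj0, List.getElem?_eq_getElem hjt1]
      have eR : PySem.List.pyGetD (PySem.List.pyGetD res (i+1) []) j 0
          = res[i.toNat + 1][j.toNat] := by
        rw [pyGetD_nonneg' res (i+1) [] (by omega), hi1t, List.getD_eq_getElem _ _ hit1,
          pyGetD_nonneg' _ j 0 hj0, List.getD_eq_getElem _ _ hjt1]
      rw [if_pos hc1]
      simp only [e3, e4]
      by_cases hEq : res[i.toNat][j.toNat] = res[i.toNat + 1][j.toNat]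
      · -- south move: B's scan drops at the entry cell
        rw [if_pos (show ((res[i.toNat][j.toNat] == res[i.toNat + 1][j.toNat]) = true) from
          beq_iff_eq.mpr hEq)]
        conv_rhs =>
          rw [segLoop, PySem.List.pyRange_neg_one_cons (by omega : s - 1 < j)]
        conv_rhs => rw [scanLoop]
        rw [if_pos (⟨hc1.1, hc1.2, by rw [eL, eR]; exact hEq⟩ :
          i + 1 < ((lam.length : Nat) : Int) ∧ j < PySem.List.pyGetD lam (i+1) 0 ∧
            PySem.List.pyGetD (PySem.List.pyGetD res i []) j 0
              = PySem.List.pyGetD (PySem.List.pyGetD res (i+1) []) j 0)]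
        rw [if_neg (by omega : ¬ (j < 0)), hIR j]
        exact ih f2 (i+1) j (pvIncr res i j) hWF' (by omega) hc1.1 hsj hc1.2 (by omega) (by omega)
      · -- no south move here
        rw [if_neg (by simp [hEq] : ¬ ((res[i.toNat][j.toNat] == res[i.toNat + 1][j.toNat]) = true))]
        have hNSC : ¬ (i + 1 < ((lam.length : Nat) : Int) ∧ j < PySem.List.pyGetD lam (i+1) 0 ∧
            PySem.List.pyGetD (PySem.List.pyGetD res i []) j 0
              = PySem.List.pyGetD (PySem.List.pyGetD res (i+1) []) j 0) := by
          rintro ⟨_, _, h3⟩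
          rw [eL, eR] at h3
          exact hEq h3
        by_cases hjs : j = s
        · subst hjs
          rw [if_pos (show ((j == j) = true) by simp)]
          conv_rhs =>
            rw [segLoop, PySem.List.pyRange_neg_one_cons (by omega : j - 1 < j),
              PySem.List.pyRange_neg_one_eq_nil (by omega : j - 1 ≤ j - 1)]
          conv_rhs => rw [scanLoop]
          rw [if_neg hNSC]
          conv_rhs => rw [scanLoop]
          rw [if_pos (by omega : (-1 : Int) < 0), hIR j]
        · rw [if_neg (by simp [hjs] : ¬ ((j == s) = true))]
          rw [ih (f2+1) i (j-1) (pvIncr res i j) hWF' hi0 hiL (by omega) (by omega) (by omega)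
            (by omega)]
          exact (seg_west lam s f2 i j res hi0 hs (by omega) hNSC).symm
    · rw [if_neg hc1]
      have hNSC : ¬ (i + 1 < ((lam.length : Nat) : Int) ∧ j < PySem.List.pyGetD lam (i+1) 0 ∧
          PySem.List.pyGetD (PySem.List.pyGetD res i []) j 0
            = PySem.List.pyGetD (PySem.List.pyGetD res (i+1) []) j 0) := by
        rintro ⟨h1, h2, _⟩
        exact hc1 ⟨h1, h2⟩
      rw [if_neg (by simp : ¬ ((false : Bool) = true))]
      by_cases hjs : j = s
      · subst hjs
        rw [if_pos (show ((j == j) = true) by simp)]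
        conv_rhs =>
          rw [segLoop, PySem.List.pyRange_neg_one_cons (by omega : j - 1 < j),
            PySem.List.pyRange_neg_one_eq_nil (by omega : j - 1 ≤ j - 1)]
        conv_rhs => rw [scanLoop]
        rw [if_neg hNSC]
        conv_rhs => rw [scanLoop]
        rw [if_pos (by omega : (-1 : Int) < 0), hIR j]
      · rw [if_neg (by simp [hjs] : ¬ ((j == s) = true))]
        rw [ih (f2+1) i (j-1) (pvIncr res i j) hWF' hi0 hiL (by omega) (by omega) (by omega)
          (by omega)]
        exact (seg_west lam s f2 i j res hi0 hs (by omega) hNSC).symm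

theorem foldl_toNat_init_le : ∀ (t : List Int) (n : Nat),
    n ≤ t.foldl (fun a x => a + x.toNat) n := by
  intro t
  induction t with
  | nil => intro n; simp
  | cons y ys ih =>
    intro n
    simp only [List.foldl_cons]
    calc n ≤ n + y.toNat := by omega
      _ ≤ _ := ih _

theorem foldl_toNat_mem_le : ∀ (t : List Int) (n : Nat) (x : Int), x ∈ t →
    n + x.toNat ≤ t.foldl (fun a x => a + x.toNat) n := by
  intro t
  induction t with
  | nil => intro n x hx; simp at hx
  | cons y ys ih =>
    intro n x hx
    simp only [List.foldl_cons]
    rcases List.mem_cons.mp hx with rfl | h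
    · exact foldl_toNat_init_le ys (n + x.toNat)
    · have := ih (n + y.toNat) x h
      omega

theorem step_eq (lam : List Int) (res : List (List Int)) (r s : Int) (hWF : pvWF lam res)
    (hr0 : 0 ≤ r) (hr : r < (lam.length : Int)) (hs0 : 0 ≤ s) (hs : s < PySem.List.pyGetD lam r 0) :
    pvStep lam res (r, s) = segStep lam res (r, s) := by
  unfold pvStep segStep
  dsimp only
  have hrt : r.toNat < lam.length := by omega
  have hg : PySem.List.pyGetD lam r 0 = lam[r.toNat] := PySem.List.pyGetD_eq_getElem lam 0 hr0 hr
  have hsum : lam.length + (lam[r.toNat]).toNat ≤ lam.foldl (fun a x => a + x.toNat) lam.length :=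
    foldl_toNat_mem_le lam lam.length _ (List.getElem_mem hrt)
  apply runPath_eq_segLoop lam s hs0 _ _ r _ res hWF hr0 hr (by omega) (by omega)
  · unfold pvFuel
    rw [hg] at hs ⊢
    omega
  · unfold pvFuel
    have := foldl_toNat_init_le lam lam.length
    omega

-- ---------- Pre_ delivers the bounds for every generated unit ----------

-- ---------- reduction of both ports to a fold over the same unit sequence ----------

theorem applyUnits_eq (shape : List Int) (r j : Int) (n : Nat) (res : List (List Int)) :
    applyUnits shape shape.length r j n res
      = (List.replicate n (r, j)).foldl (segStep shape) res := by
  induction n generalizing res with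
  | zero => rfl
  | succ n ih => simp [applyUnits, List.replicate_succ, ih, segStep]

theorem rowLoop_eq (shape : List Int) (j : Int) (rows : List (List Int)) (r : Int) (res : List (List Int)) :
    rowLoop shape shape.length j rows r res
      = (unitsRow j rows r).foldl (segStep shape) res := by
  induction rows generalizing r res with
  | nil => rfl
  | cons row rest ih =>
    simp only [rowLoop, unitsRow]
    split
    · rfl
    · rw [ih, List.foldl_append, applyUnits_eq]

theorem colUnits_aux (j : Int) (rows : List (List Int)) (s : Int) (acc : List (Int × Int)) :
    (PySem.List.enumerate (colBuild rows j) s).foldl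
      (fun c re => if re.2 ≠ 0 then c ++ List.replicate re.2.toNat (re.1, j) else c) acc
      = acc ++ unitsRow j rows s := by
  induction rows generalizing s acc with
  | nil => simp [colBuild, unitsRow]
  | cons row rest ih =>
    simp only [colBuild, unitsRow]
    by_cases h : j < (row.length : Int)
    · rw [if_pos h, if_neg (by omega), PySem.List.enumerate_cons, List.foldl_cons, ih]
      by_cases hz : PySem.List.pyGetD row j 0 = 0
      · simp [hz]
      · simp [hz]
    · rw [if_neg h, if_pos (by omega)]
      simp [PySem.List.enumerate]

theorem colUnits_eq (j : Int) (rows : List (List Int)) :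
    colUnits j (colBuild rows j) = unitsRow j rows 0 := by
  unfold colUnits
  rw [colUnits_aux, List.nil_append]

theorem enumerate_map_pyRange {α β : Type} (g : Int → α) (F : Int × α → List β) :
    ∀ (n : Nat) (a : Int),
    (PySem.List.enumerate ((PySem.List.pyRange a (a + n) 1).map g) a).flatMap F
      = (PySem.List.pyRange a (a + n) 1).flatMap (fun j => F (j, g j)) := by
  intro n
  induction n with
  | zero => intro a; simp
  | succ m ih =>
    intro a
    rw [PySem.List.pyRange_one_cons (by omega : a < a + ((m+1 : Nat) : Int))]
    have h1 : a + 1 + (m : Int) = a + ((m+1 : Nat) : Int) := by push_cast; ring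
    simp only [List.map_cons, PySem.List.enumerate_cons, List.flatMap_cons]
    rw [← h1, ih (a+1), h1]

theorem hg_forward_units (shape : List Int) (filling : List (List Int)) :
    hillman_grassl_forward shape filling
      = ((PySem.List.pyRange (shape.headD 0 - 1) (-1) (-1)).flatMap
          (fun j => unitsRow j filling 0)).foldl (pvStep shape)
          (shape.map (fun rowlen => List.replicate rowlen.toNat (0 : Int))) := by
  cases shape with
  | nil =>
    simp [hillman_grassl_forward, transposeFilling]
  | cons s0 t =>
    unfold hillman_grassl_forward transposeFilling
    simp only [List.headD_cons]
    rw [PySem.List.foldl_append_singleton_eq_map, List.nil_append,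
        PySem.List.foldl_append_eq_flatMap, List.nil_append]
    have hn : s0 = 0 + ((s0.toNat : Nat) : Int) ∨ s0 ≤ 0 := by omega
    have key : (PySem.List.enumerate ((PySem.List.pyRange 0 s0 1).map (colBuild filling)) 0).flatMap
        (fun jc => (colUnits jc.1 jc.2).reverse)
        = (PySem.List.pyRange 0 s0 1).flatMap (fun j => (colUnits j (colBuild filling j)).reverse) := by
      rcases hn with h | h
      · rw [h]; exact enumerate_map_pyRange _ _ s0.toNat 0
      · rw [PySem.List.pyRange_one_eq_nil h]; simp
    rw [key, List.reverse_flatMap]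
    rw [PySem.List.pyRange_neg_one_eq_reverse]
    have hb : (-1 : Int) + 1 = 0 := by omega
    have ha : s0 - 1 + 1 = s0 := by omega
    rw [hb, ha]
    have hf : (List.reverse ∘ fun j => (colUnits j (colBuild filling j)).reverse)
        = fun j => unitsRow j filling 0 := by
      funext j; simp [colUnits_eq]
    rw [hf]
    rfl

theorem hg_alt_units (shape : List Int) (filling : List (List Int)) :
    hillman_grassl_forward_alt shape filling
      = ((PySem.List.pyRange (shape.headD 0 - 1) (-1) (-1)).flatMap
          (fun j => unitsRow j filling 0)).foldl (segStep shape)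
          (shape.map (fun rowlen => List.replicate rowlen.toNat (0 : Int))) := by
  unfold hillman_grassl_forward_alt
  rw [List.foldl_flatMap]
  apply PySem.List.foldl_congr_mem
  intro acc j _
  rw [rowLoop_eq]

-- ---------- Pre_ delivers the bounds for every generated unit ----------

theorem mem_unitsRow (jj : Int) (hjj : 0 ≤ jj) :
    ∀ (rows : List (List Int)) (r0 : Int) (p : Int × Int), p ∈ unitsRow jj rows r0 →
      ∃ k : Nat, p.1 = r0 + k ∧ p.2 = jj ∧ k < rows.length ∧
        (∀ k' ≤ k, jj.toNat < (rows.getD k' []).length) ∧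
        0 < (rows.getD k []).getD jj.toNat 0 := by
  intro rows
  induction rows with
  | nil => intro r0 p hp; simp [unitsRow] at hp
  | cons row rest ih =>
    intro r0 p hp
    simp only [unitsRow] at hp
    by_cases hlen : ((row.length : Int) ≤ jj)
    · rw [if_pos hlen] at hp; simp at hp
    · rw [if_neg hlen] at hp
      rcases List.mem_append.mp hp with h | h
      · have hpe : p = (r0, jj) := List.eq_of_mem_replicate h
        have hn0 : (PySem.List.pyGetD row jj 0).toNat ≠ 0 := (List.mem_replicate.mp h).1
        rw [pyGetD_nonneg' row jj 0 hjj] at hn0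
        refine ⟨0, by rw [hpe]; simp, by rw [hpe], by simp, ?_, ?_⟩
        · intro k' hk'
          have : k' = 0 := Nat.le_zero.mp hk'
          subst this
          simp only [List.getD_cons_zero]
          omega
        · simp only [List.getD_cons_zero]
          omega
      · obtain ⟨k, h1, h2, h3, h4, h5⟩ := ih (r0+1) p h
        refine ⟨k+1, by rw [h1]; push_cast; ring, h2, by simp; omega, ?_, ?_⟩
        · intro k' hk'
          cases k' with
          | zero => simp only [List.getD_cons_zero]; omega
          | succ k'' => simp only [List.getD_cons_succ]; exact h4 k'' (by omega)
        · simp only [List.getD_cons_succ]; exact h5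

theorem units_bounds (shape : List Int) (filling : List (List Int))
    (hPre : Pre_hillman_grassl_forward shape filling) (p : Int × Int)
    (hp : p ∈ (PySem.List.pyRange (shape.headD 0 - 1) (-1) (-1)).flatMap
          (fun j => unitsRow j filling 0)) :
    0 ≤ p.1 ∧ p.1 < (shape.length : Int) ∧ 0 ≤ p.2 ∧ p.2 < PySem.List.pyGetD shape p.1 0 := by
  rcases List.mem_flatMap.mp hp with ⟨jj, hjr, hpu⟩
  rw [PySem.List.mem_pyRange_neg_one] at hjr
  have hjj0 : 0 ≤ jj := by omega
  obtain ⟨k, h1, h2, h3, h4, h5⟩ := mem_unitsRow jj hjj0 filling 0 p hpu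
  have hk : ((k : Nat) : Int) = p.1 := by rw [h1]; ring
  have hpre := hPre k h3 jj.toNat (h4 k le_rfl)
    ⟨by omega, h4, h5⟩
  obtain ⟨hklen, hkval⟩ := hpre
  refine ⟨by omega, by omega, by omega, ?_⟩
  have hg : PySem.List.pyGetD shape p.1 0 = shape.getD k 0 := by
    rw [← hk, PySem.List.pyGetD_natCast]
  rw [hg]
  omega

theorem foldl_step_eq (lam : List Int) :
    ∀ (us : List (Int × Int)) (res : List (List Int)), pvWF lam res →
      (∀ p ∈ us, 0 ≤ p.1 ∧ p.1 < (lam.length : Int) ∧ 0 ≤ p.2 ∧ p.2 < PySem.List.pyGetD lam p.1 0) →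
      us.foldl (pvStep lam) res = us.foldl (segStep lam) res := by
  intro us
  induction us with
  | nil => intro res _ _; rfl
  | cons p ps ih =>
    intro res hWF hb
    obtain ⟨h1, h2, h3, h4⟩ := hb p (by simp)
    simp only [List.foldl_cons]
    have hst : pvStep lam res p = segStep lam res p := by
      cases p
      exact step_eq lam res _ _ hWF h1 h2 h3 h4
    rw [hst]
    apply ih
    · unfold pvWF segStep
      rw [map_length_segLoop lam p.2 h3 _ p.1 _ res h1]
      exact hWF
    · intro q hq
      exact hb q (by simp [hq])

-- ===== VERDICT (by name: the statement is the Claim_ definition above) =====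
theorem hillman_grassl_forward_spec : Claim_equal_hillman_grassl_forward := by
  intro shape filling _ hPre
  unfold Spec_hillman_grassl_forward
  rw [hg_forward_units, hg_alt_units]
  apply foldl_step_eq
  · unfold pvWF
    simp [Function.comp]
  · intro p hp
    exact units_bounds shape filling hPre p hp
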